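-- pv_equiv track=rewrite | github.com/eva-takou/Noise_estimation_of_DEMs | sims/repetition_code_Steane_SE/utilities_for_Steane_SE.py | get_det_inds_as_rd_anc_pairs
-- ===== SOURCE A (Python) =====
-- def get_det_inds_as_rd_anc_pairs(num_rounds: int, num_ancilla: int):
--     '''Get a dictionary of the detector index and the number of QEC round and detection it corresponds.
--
--     Input:
--         num_rounds: # of QEC rounds
--         num_ancilla: # of ancilla (detectors) per QEC rounds
--     Output:
--         det_inds_rd_anc: dictionary with keys the indices of detectors and values the (rd,anc) it corresponds to.
--
--     '''
--     num_rounds +=1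
--     det_inds_rd_anc = {}
--
--     for rd in range(num_rounds):
--
--         for anc in range(num_ancilla):
--
--             new_ind = anc + rd*num_ancilla
--
--             det_inds_rd_anc[new_ind]=(rd,anc)
--
--     return det_inds_rd_anc
-- ===== SOURCE B (Python) =====
-- def get_det_inds_as_rd_anc_pairs(num_rounds: int, num_ancilla: int):
--     '''Single-pass rewrite: enumerate flat detector indices and decode (rd, anc) via divmod.'''
--     if num_ancilla <= 0:
--         return {}
--     return {i: divmod(i, num_ancilla) for i in range((num_rounds + 1) * num_ancilla)}
-- ===== Notes on version B (the rewrite author's own statement) =====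
-- stated objective: alternative
-- what changed: Replaces the nested rounds x ancilla loop that forward-computes each key with a single flat enumeration of the index range whose (round, ancilla) pair is decoded by divmod, as a dict comprehension behind a num_ancilla <= 0 guard.
import Mathlib
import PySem

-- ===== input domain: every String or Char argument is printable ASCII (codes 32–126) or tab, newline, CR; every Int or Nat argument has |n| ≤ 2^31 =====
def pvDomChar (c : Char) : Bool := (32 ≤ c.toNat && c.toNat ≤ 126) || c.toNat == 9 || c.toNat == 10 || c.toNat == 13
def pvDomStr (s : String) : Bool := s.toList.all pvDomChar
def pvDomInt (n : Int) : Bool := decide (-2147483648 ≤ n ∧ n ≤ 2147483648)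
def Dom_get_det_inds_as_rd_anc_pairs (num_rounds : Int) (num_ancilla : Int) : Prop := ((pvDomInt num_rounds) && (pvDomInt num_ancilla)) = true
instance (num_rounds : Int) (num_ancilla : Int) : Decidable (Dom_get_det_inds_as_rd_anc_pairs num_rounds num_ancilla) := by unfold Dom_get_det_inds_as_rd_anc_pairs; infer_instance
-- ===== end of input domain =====

-- B replaces the nested rounds×ancilla loop by one flat enumeration decoded with divmod (alternative decomposition, same cost).

-- ===== PORT A =====
-- literal transliteration of A: num_rounds += 1, nested loop inserting anc + rd*num_ancilla into a dict
def get_det_inds_as_rd_anc_pairs (num_rounds : Int) (num_ancilla : Int) : List (Int × Int × Int) :=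
  let num_rounds := num_rounds + 1
  let det_inds_rd_anc : PySem.Dict Int (Int × Int) :=
    (PySem.List.pyRange 0 num_rounds 1).foldl (fun d rd =>
      (PySem.List.pyRange 0 num_ancilla 1).foldl (fun d anc =>
        d.insert (anc + rd * num_ancilla) (rd, anc)) d) PySem.Dict.empty
  det_inds_rd_anc.items

-- ===== PORT B =====
-- literal transliteration of Source B: guard, then dict comprehension over the flat range with divmod
def get_det_inds_as_rd_anc_pairs_alt (num_rounds : Int) (num_ancilla : Int) : List (Int × Int × Int) :=
  if num_ancilla ≤ 0 then []
  else
    (PySem.List.pyRange 0 ((num_rounds + 1) * num_ancilla) 1).map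
      (fun i => (i, PySem.Int.floordiv i num_ancilla, PySem.Int.mod i num_ancilla))

-- ===== PRECONDITION & SPEC =====
def Spec_get_det_inds_as_rd_anc_pairs (num_rounds : Int) (num_ancilla : Int) (out : List (Int × Int × Int)) : Prop := out = get_det_inds_as_rd_anc_pairs_alt num_rounds num_ancilla
instance (num_rounds : Int) (num_ancilla : Int) (out : List (Int × Int × Int)) : Decidable (Spec_get_det_inds_as_rd_anc_pairs num_rounds num_ancilla out) := by unfold Spec_get_det_inds_as_rd_anc_pairs; infer_instance

-- ===== CLAIM (what is proved, stated in full; the proofs are below) =====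
def Claim_equal_get_det_inds_as_rd_anc_pairs : Prop := ∀ (num_rounds : Int) (num_ancilla : Int), Dom_get_det_inds_as_rd_anc_pairs num_rounds num_ancilla → Spec_get_det_inds_as_rd_anc_pairs num_rounds num_ancilla (get_det_inds_as_rd_anc_pairs num_rounds num_ancilla)

-- ===== LEMMAS AND PROOFS =====

-- the round-by-round step of A's outer loop
def pvStep (num_ancilla : Int) (d : PySem.Dict Int (Int × Int)) (rd : Int) : PySem.Dict Int (Int × Int) :=
  (PySem.List.pyRange 0 num_ancilla 1).foldl (fun d anc =>
    d.insert (anc + rd * num_ancilla) (rd, anc)) d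

-- decoding of a flat index
def pvF (na : Int) (i : Int) : Int × Int × Int := (i, PySem.Int.floordiv i na, PySem.Int.mod i na)

lemma pvMain (na : Int) (hna : 0 < na) (n : Nat) :
    ((PySem.List.pyRange 0 (n : Int) 1).foldl (pvStep na) PySem.Dict.empty).items
      = (PySem.List.pyRange 0 ((n : Int) * na) 1).map (pvF na) := by
  induction n with
  | zero => simp [PySem.List.pyRange_one_eq_nil, PySem.Dict.empty]
  | succ n ih =>
    have hsplit : PySem.List.pyRange 0 ((n : Int) + 1) 1
        = PySem.List.pyRange 0 (n : Int) 1 ++ [(n : Int)] := by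
      exact PySem.List.pyRange_one_succ_right (by positivity)
    have hkeys : ((PySem.List.pyRange 0 (n : Int) 1).foldl (pvStep na) PySem.Dict.empty).items.map (·.1)
        = PySem.List.pyRange 0 ((n : Int) * na) 1 := by
      rw [ih]; simp [pvF, List.map_map, Function.comp_def]
    have hfresh : ∀ anc ∈ PySem.List.pyRange 0 na 1,
        ((PySem.List.pyRange 0 (n : Int) 1).foldl (pvStep na) PySem.Dict.empty).contains
          (anc + (n : Int) * na) = false := by
      intro anc hanc
      rw [PySem.List.mem_pyRange_one] at hanc
      rw [PySem.Dict.contains_eq_decide_mem_keys]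
      simp only [PySem.Dict.keys, hkeys]
      rw [decide_eq_false_iff_not, PySem.List.mem_pyRange_one]
      intro hmem
      nlinarith [hanc.1, hmem.2]
    have hnodup : ((PySem.List.pyRange 0 na 1).map (fun anc => anc + (n : Int) * na)).Nodup := by
      refine List.Nodup.map ?_ (PySem.List.nodup_pyRange_one 0 na)
      intro a b h; linarith
    push_cast
    rw [hsplit, List.foldl_append]
    simp only [List.foldl_cons, List.foldl_nil]
    rw [pvStep, PySem.Dict.items_foldl_insert_fresh _ _ _ _ hfresh hnodup, ih]
    -- remains: range-append identity on the RHS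
    have h1 : (0:Int) ≤ (n : Int) * na := by positivity
    have h2 : (n : Int) * na ≤ ((n : Int) + 1) * na := by nlinarith
    rw [PySem.List.pyRange_one_append 0 ((n : Int) * na) (((n : Int) + 1) * na) h1 h2, List.map_append]
    congr 1
    -- elementwise on the last block
    rw [PySem.List.pyRange_one ((n : Int) * na) (((n : Int) + 1) * na),
        PySem.List.pyRange_one 0 na]
    have hlen : ((((n : Int) + 1) * na) - (n : Int) * na).toNat = (na - 0).toNat := by
      congr 1; ring
    rw [hlen]
    rw [List.map_map, List.map_map]
    apply List.map_congr_left
    intro k hk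
    rw [List.mem_range] at hk
    have hkna : (k : Int) < na := by omega
    have hdiv : PySem.Int.floordiv ((n : Int) * na + (k : Int)) na = (n : Int) := by
      rw [PySem.Int.floordiv_eq_iff_of_pos hna]
      constructor <;> nlinarith
    have hmod : PySem.Int.mod ((n : Int) * na + (k : Int)) na = (k : Int) := by
      have := PySem.Int.floordiv_mul_add_mod ((n : Int) * na + (k : Int)) na
      rw [hdiv] at this; omega
    simp [pvF, Function.comp, hdiv, hmod]
    omega

-- ===== VERDICT (by name: the statement is the Claim_ definition above) =====
theorem get_det_inds_as_rd_anc_pairs_spec : Claim_equal_get_det_inds_as_rd_anc_pairs := by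
  intro nr na _
  show get_det_inds_as_rd_anc_pairs nr na = get_det_inds_as_rd_anc_pairs_alt nr na
  unfold get_det_inds_as_rd_anc_pairs get_det_inds_as_rd_anc_pairs_alt
  by_cases hna : na ≤ 0
  · -- inner range empty: the fold is the identity, dict stays empty
    simp only [if_pos hna]
    have : ∀ l : List Int, (l.foldl (fun d rd =>
        (PySem.List.pyRange 0 na 1).foldl (fun d anc =>
          d.insert (anc + rd * na) (rd, anc)) d) PySem.Dict.empty) = PySem.Dict.empty := by
      intro l
      induction l with
      | nil => rfl
      | cons x xs ih =>
        simpa only [List.foldl_cons, PySem.List.pyRange_one_eq_nil hna, List.foldl_nil] using ih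
    exact congrArg PySem.Dict.items (this _)
  · replace hna : 0 < na := by omega
    simp only [if_neg (by omega : ¬ na ≤ 0)]
    by_cases hnr : nr + 1 ≤ 0
    · have h1 : PySem.List.pyRange 0 (nr + 1) 1 = [] := PySem.List.pyRange_one_eq_nil hnr
      have h2 : PySem.List.pyRange 0 ((nr + 1) * na) 1 = [] :=
        PySem.List.pyRange_one_eq_nil (by nlinarith)
      simp [h1, h2, PySem.Dict.empty]
    · replace hnr : 0 < nr + 1 := by omega
      obtain ⟨n, hn⟩ : ∃ n : Nat, nr + 1 = (n : Int) := ⟨(nr + 1).toNat, by omega⟩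
      rw [hn]
      have := pvMain na hna n
      simpa [pvStep, pvF] using this
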